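-- pv_equiv track=rewrite | github.com/ennmahmud/preventive-health-assistant | src/chatbot/responses/response_generator.py | recommendations_summary
-- ===== SOURCE A (Python) =====
-- from typing import Any, Dict, List, Optional
--
-- _DISCLAIMER = (
--     "_Disclaimer: This is a screening tool, not medical advice. "
--     "Always consult a qualified healthcare professional._"
-- )
--
-- _CONDITION_NAMES = {
--     "diabetes": "diabetes",
--     "cvd": "cardiovascular disease (CVD)",
--     "hypertension": "hypertension",
-- }
--
-- def recommendations_summary(condition: str, result: Dict[str, Any]) -> str:
--     """Summarise recommendations from the last result."""
--     recs = result.get("recommendations", [])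
--     if not recs:
--         return (
--             "I don't have specific recommendations stored for this result. "
--             "For personalised advice, please consult a healthcare professional."
--         )
--
--     cond_name = _CONDITION_NAMES.get(condition, condition)
--     lines = [f"**Recommendations to lower your {cond_name} risk:**", ""]
--
--     high = [r for r in recs if r.get("priority") == "high"]
--     medium = [r for r in recs if r.get("priority") == "medium"]
--     low = [r for r in recs if r.get("priority") == "low"]
--
--     for r in (high + medium + low)[:5]:
--         priority_label = {"high": "🔴", "medium": "🟡", "low": "🟢"}.get(r.get("priority", "low"), "•")
--         lines.append(f"{priority_label} **{r.get('category', '').capitalize()}:** {r.get('recommendation', '')}")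
--
--     lines.append("")
--     lines.append(_DISCLAIMER)
--     return "\n".join(lines)
-- ===== SOURCE B (Python) =====
-- _DISCLAIMER = (
--     "_Disclaimer: This is a screening tool, not medical advice. "
--     "Always consult a qualified healthcare professional._"
-- )
--
-- _CONDITION_NAMES = {
--     "diabetes": "diabetes",
--     "cvd": "cardiovascular disease (CVD)",
--     "hypertension": "hypertension",
-- }
--
-- def recommendations_summary(condition, result):
--     """Summarise recommendations from the last result (single stable sort by priority rank)."""
--     recs = result.get("recommendations", [])
--     if not recs:
--         return (
--             "I don't have specific recommendations stored for this result. "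
--             "For personalised advice, please consult a healthcare professional."
--         )
--     cond_name = _CONDITION_NAMES.get(condition, condition)
--     rank = {"high": 0, "medium": 1, "low": 2}
--     ordered = sorted(
--         [r for r in recs if r.get("priority") in ("high", "medium", "low")],
--         key=lambda r: rank[r.get("priority")],
--     )
--     body = [
--         f"{ {'high': '🔴', 'medium': '🟡', 'low': '🟢'}.get(r.get('priority', 'low'), '•') } "
--         f"**{r.get('category', '').capitalize()}:** {r.get('recommendation', '')}"
--         for r in ordered[:5]
--     ]
--     return "\n".join(
--         [f"**Recommendations to lower your {cond_name} risk:**", ""] + body + ["", _DISCLAIMER]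
--     )
-- ===== Notes on version B (the rewrite author's own statement) =====
-- stated objective: alternative
-- what changed: The three per-priority comprehensions and their high+medium+low concatenation, plus the line-appending loop, are replaced by one filter and a single stable sort under a rank key {high:0,medium:1,low:2}, with the message assembled as one list expression.
import Mathlib
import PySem

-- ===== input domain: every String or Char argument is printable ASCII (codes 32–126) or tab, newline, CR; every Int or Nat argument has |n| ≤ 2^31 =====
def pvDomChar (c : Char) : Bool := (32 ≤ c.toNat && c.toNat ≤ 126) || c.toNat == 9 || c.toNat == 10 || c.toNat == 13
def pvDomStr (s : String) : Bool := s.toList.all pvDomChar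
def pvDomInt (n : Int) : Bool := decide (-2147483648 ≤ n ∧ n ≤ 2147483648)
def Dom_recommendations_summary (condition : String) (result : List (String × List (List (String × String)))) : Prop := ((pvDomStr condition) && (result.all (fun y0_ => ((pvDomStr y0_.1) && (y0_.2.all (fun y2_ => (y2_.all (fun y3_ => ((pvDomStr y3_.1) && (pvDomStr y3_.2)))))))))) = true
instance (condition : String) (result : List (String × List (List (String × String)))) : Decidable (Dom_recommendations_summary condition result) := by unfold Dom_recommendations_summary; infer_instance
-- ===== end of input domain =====

-- B replaces A's three per-priority comprehensions + concatenation and its append loop by one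
-- filter, one stable sort under a rank key, and a single list expression (objective: alternative).

-- shared helpers (identical code in both Pythons: module constants, dict .get on a string dict,
-- the condition-name lookup, str.capitalize, and the identical per-line f-string)
def pvDisclaimer : String :=
  "_Disclaimer: This is a screening tool, not medical advice. Always consult a qualified healthcare professional._"

def pvNoRecs : String :=
  "I don't have specific recommendations stored for this result. For personalised advice, please consult a healthcare professional."

-- r.get(k, dflt) on a str→str dict (assoc list, first match)
def pvGetS (r : List (String × String)) (k : String) (dflt : String) : String :=
  (r.lookup k).getD dflt

-- _CONDITION_NAMES.get(condition, condition) — a literal three-key dict, unrolled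
def pvCondName (condition : String) : String :=
  if condition == "diabetes" then "diabetes"
  else if condition == "cvd" then "cardiovascular disease (CVD)"
  else if condition == "hypertension" then "hypertension"
  else condition

-- str.capitalize(): first char uppercased, rest lowered — exact on the ASCII domain
def pvCapitalize (s : String) : String :=
  match s.toList with
  | [] => ""
  | c :: rest => String.ofList (PySem.Chars.upperChar c :: PySem.Chars.lower rest)

-- the f-string "{label} **{category.capitalize()}:** {recommendation}" with the label dict unrolled
def pvFmtLine (r : List (String × String)) : String :=
  let p := pvGetS r "priority" "low"
  let lbl := if p == "high" then "🔴" else if p == "medium" then "🟡"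
             else if p == "low" then "🟢" else "•"
  lbl ++ " **" ++ pvCapitalize (pvGetS r "category" "") ++ ":** " ++ pvGetS r "recommendation" ""

-- ===== PORT A =====
def recommendations_summary (condition : String) (result : List (String × List (List (String × String)))) : String :=
  let recs := (result.lookup "recommendations").getD []
  if recs == [] then pvNoRecs
  else
    let condName := pvCondName condition
    let lines : List String := ["**Recommendations to lower your " ++ condName ++ " risk:**", ""]
    let high := recs.filter (fun r => r.lookup "priority" == some "high")
    let medium := recs.filter (fun r => r.lookup "priority" == some "medium")
    let low := recs.filter (fun r => r.lookup "priority" == some "low")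
    let lines := (PySem.List.slice (high ++ medium ++ low) none (some 5)).foldl
      (fun acc r => acc ++ [pvFmtLine r]) lines
    let lines := lines ++ [""]
    let lines := lines ++ [pvDisclaimer]
    PySem.Str.join "\n" lines

-- ===== PORT B =====
-- rank[r.get("priority")] — only applied to filtered recs, whose priority is one of the three keys
def pvRank (r : List (String × String)) : Int :=
  if r.lookup "priority" == some "high" then 0
  else if r.lookup "priority" == some "medium" then 1
  else 2

def recommendations_summary_alt (condition : String) (result : List (String × List (List (String × String)))) : String :=
  let recs := (result.lookup "recommendations").getD []
  if recs == [] then pvNoRecs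
  else
    let condName := pvCondName condition
    let ordered := PySem.List.sorted
      (recs.filter (fun r => match r.lookup "priority" with
        | some p => ["high", "medium", "low"].contains p
        | none => false))
      pvRank
    let body := (PySem.List.slice ordered none (some 5)).map pvFmtLine
    PySem.Str.join "\n"
      (["**Recommendations to lower your " ++ condName ++ " risk:**", ""] ++ body ++ ["", pvDisclaimer])

-- ===== PRECONDITION & SPEC =====
def Spec_recommendations_summary (condition : String) (result : List (String × List (List (String × String)))) (out : String) : Prop := out = recommendations_summary_alt condition result
instance (condition : String) (result : List (String × List (List (String × String)))) (out : String) : Decidable (Spec_recommendations_summary condition result out) := by unfold Spec_recommendations_summary; infer_instance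

-- ===== CLAIM (what is proved, stated in full; the proofs are below) =====
def Claim_equal_recommendations_summary : Prop := ∀ (condition : String) (result : List (String × List (List (String × String)))), Dom_recommendations_summary condition result → Spec_recommendations_summary condition result (recommendations_summary condition result)

-- ===== LEMMAS AND PROOFS =====

lemma pv_foldl_append_map {α β : Type} (f : α → β) (l : List α) (init : List β) :
    l.foldl (fun acc r => acc ++ [f r]) init = init ++ l.map f := by
  induction l generalizing init with
  | nil => simp
  | cons x xs ih => simp [List.foldl_cons, ih]

lemma pv_insertBy_middle {α : Type} (before : α → α → Bool) (x : α) (ys zs : List α)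
    (h1 : ∀ y ∈ ys, before x y = false) (h2 : ∀ z ∈ zs, before x z = true) :
    PySem.List.insertBy before x (ys ++ zs) = ys ++ x :: zs := by
  induction ys with
  | nil =>
    cases zs with
    | nil => simpa using PySem.List.insertBy_of_forall_not_before before x [] (by simp)
    | cons z zs' => simp [PySem.List.insertBy, h2 z (by simp)]
  | cons y ys' ih =>
    simp only [List.cons_append, PySem.List.insertBy, h1 y (by simp)]
    simp [ih (fun y' hy' => h1 y' (by simp [hy']))]


-- the single filter predicate of B and A's three bucket predicates, as the ports write them
lemma pv_sorted_buckets (recs : List (List (String × String))) :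
    PySem.List.sorted
      (recs.filter (fun r => match r.lookup "priority" with
        | some p => ["high", "medium", "low"].contains p
        | none => false))
      pvRank
      = recs.filter (fun r => r.lookup "priority" == some "high")
        ++ recs.filter (fun r => r.lookup "priority" == some "medium")
        ++ recs.filter (fun r => r.lookup "priority" == some "low") := by
  rw [PySem.List.sorted_eq_foldl_insertBy]
  induction recs using List.reverseRecOn with
  | nil => simp
  | append_singleton rs r ih =>
    simp only [List.filter_append, List.foldl_append]
    have hfT : ∀ (p : List (String × String) → Bool), p r = true → List.filter p [r] = [r] := by
      intro p hp; simp [hp]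
    have hfF : ∀ (p : List (String × String) → Bool), p r = false → List.filter p [r] = [] := by
      intro p hp; simp [hp]
    have memQ : ∀ (s : String) (y : List (String × String)),
        y ∈ rs.filter (fun r => r.lookup "priority" == some s) →
        List.lookup "priority" y = some s := by
      intro s y hy
      have := (List.mem_filter.mp hy).2
      simpa using this
    by_cases h0 : r.lookup "priority" = some "high"
    · rw [hfT _ (by simp [h0]), hfT _ (by simp [h0]), hfF _ (by simp [h0]), hfF _ (by simp [h0])]
      rw [List.foldl_cons, List.foldl_nil, ih, List.append_assoc,
          pv_insertBy_middle _ r _ _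
            (by intro y hy
                have := memQ _ _ hy
                simp [pvRank, h0, this])
            (by intro z hz
                rcases List.mem_append.mp hz with hz | hz <;>
                  · have := memQ _ _ hz
                    simp [pvRank, h0, this])]
      simp
    · by_cases h1 : r.lookup "priority" = some "medium"
      · rw [hfT _ (by simp [h1]), hfF _ (by simp [h1]), hfT _ (by simp [h1]), hfF _ (by simp [h1])]
        rw [List.foldl_cons, List.foldl_nil, ih,
            pv_insertBy_middle _ r _ _
              (by intro y hy
                  rcases List.mem_append.mp hy with hy | hy
                  · have := memQ _ _ hy
                    simp [pvRank, h1, this]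
                  · have := memQ _ _ hy
                    simp [pvRank, h1, this])
              (by intro z hz
                  have := memQ _ _ hz
                  simp [pvRank, h1, this])]
        simp
      · by_cases h2 : r.lookup "priority" = some "low"
        · rw [hfT _ (by simp [h2]), hfF _ (by simp [h2]), hfF _ (by simp [h2]), hfT _ (by simp [h2])]
          rw [List.foldl_cons, List.foldl_nil, ih,
              show rs.filter (fun r => r.lookup "priority" == some "high")
                  ++ rs.filter (fun r => r.lookup "priority" == some "medium")
                  ++ rs.filter (fun r => r.lookup "priority" == some "low")
                = (rs.filter (fun r => r.lookup "priority" == some "high")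
                  ++ rs.filter (fun r => r.lookup "priority" == some "medium")
                  ++ rs.filter (fun r => r.lookup "priority" == some "low")) ++ [] by simp,
              pv_insertBy_middle _ r _ []
                (by intro y hy
                    simp only [List.append_assoc, List.mem_append] at hy
                    rcases hy with hy | hy | hy <;>
                      · have := memQ _ _ hy
                        simp [pvRank, h2, this])
                (by intro z hz; simp at hz)]
          simp
        · have hq : (fun r => match List.lookup "priority" r with
              | some p => (["high", "medium", "low"].contains p : Bool)
              | none => false) r = false := by
            cases hp : r.lookup "priority" with
            | none => simp [hp]
            | some p =>
              simp [hp] at h0 h1 h2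
              simp [hp, h0, h1, h2]
          rw [hfF _ hq, hfF _ (by simp [h0]), hfF _ (by simp [h1]), hfF _ (by simp [h2])]
          simp only [List.foldl_nil, List.append_nil]
          exact ih

-- ===== VERDICT (by name: the statement is the Claim_ definition above) =====
theorem recommendations_summary_spec : Claim_equal_recommendations_summary := by
  intro condition result _
  unfold Spec_recommendations_summary recommendations_summary recommendations_summary_alt
  by_cases h : ((result.lookup "recommendations").getD []) = []
  · simp [h]
  · simp only [beq_iff_eq, if_neg h]
    rw [pv_foldl_append_map, ← pv_sorted_buckets]
    simp
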